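-- pv_equiv track=rewrite | github.com/MrBrantCode/unitest_baseline | mut_generate/mist_train_taco/taco_14456/solution.py | count_awkward_pairs
-- ===== SOURCE A (Python) =====
-- def onedsum(a):
--     ds = 0
--     while a > 9:
--         (a, u) = divmod(a, 10)
--         ds += u
--     return ds + a
--
-- def rangetodsum(lo, hi):
--     (lod, lom) = divmod(lo, 10)
--     (hid, him) = divmod(hi, 10)
--     if lod == hid:
--         dlo = onedsum(lod)
--         dsum = {dlo + i: 1 for i in range(lom, him + 1)}
--     else:
--         dlo = onedsum(lod)
--         dsum = {dlo + i: 1 for i in range(lom, 10)}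
--         dhi = onedsum(hid)
--         for h in range(dhi, dhi + him + 1):
--             if h in dsum:
--                 dsum[h] += 1
--             else:
--                 dsum[h] = 1
--         lod += 1
--         hid -= 1
--         if lod <= hid:
--             rsum = rangetodsum(lod, hid)
--             for r in rsum:
--                 for u in range(10):
--                     k = r + u
--                     if k in dsum:
--                         dsum[k] += rsum[r]
--                     else:
--                         dsum[k] = rsum[r]
--     return dsum
--
-- def count_awkward_pairs(L, R):
--     mdl = 1000000007
--     dsum = rangetodsum(L, R)
--     dlst = list(dsum.items())
--     awk = 0
--     if 1 in dsum:
--         awk = dsum[1] * (dsum[1] - 1) // 2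
--     for ix1 in range(len(dlst) - 1):
--         a = dlst[ix1]
--         for ix2 in range(ix1 + 1, len(dlst)):
--             b = dlst[ix2]
--             (f, g) = (a[0], b[0])
--             while f > 0:
--                 (g, f) = (f, g % f)
--             if g == 1:
--                 awk += a[1] * b[1]
--                 awk %= mdl
--     return awk
-- ===== SOURCE B (Python) =====
-- def _digsum(a):
--     ds = 0
--     while a > 9:
--         (a, u) = divmod(a, 10)
--         ds += u
--     return ds + a
--
--
-- def _rows(lo, hi):
--     # the two partial decade rows at the ends of [lo, hi]
--     (lod, lom) = divmod(lo, 10)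
--     (hid, him) = divmod(hi, 10)
--     d = {}
--     dlo = _digsum(lod)
--     for i in range(lom, 10):
--         d[dlo + i] = 1
--     dhi = _digsum(hid)
--     for h in range(dhi, dhi + him + 1):
--         d[h] = d.get(h, 0) + 1
--     return d
--
--
-- def _base(lo, hi):
--     (lod, lom) = divmod(lo, 10)
--     (hid, him) = divmod(hi, 10)
--     if lod == hid:
--         dlo = _digsum(lod)
--         return {dlo + i: 1 for i in range(lom, him + 1)}
--     return _rows(lo, hi)
--
--
-- def _combine(lo, hi, rsum):
--     d = _rows(lo, hi)
--     for r, c in rsum.items():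
--         for u in range(10):
--             d[r + u] = d.get(r + u, 0) + c
--     return d
--
--
-- def _range_dsum(lo, hi):
--     # iterative (explicit level list) version of the decade decomposition
--     levels = []
--     while True:
--         lod = lo // 10
--         hid = hi // 10
--         if lod == hid or lod + 1 > hid - 1:
--             break
--         levels.append((lo, hi))
--         (lo, hi) = (lod + 1, hid - 1)
--     d = _base(lo, hi)
--     for l, h in reversed(levels):
--         d = _combine(l, h, d)
--     return d
--
--
-- def count_awkward_pairs(L, R):
--     mdl = 1000000007
--     dsum = _range_dsum(L, R)
--     items = list(dsum.items())
--     c1 = dsum.get(1, 0)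
--     awk = c1 * (c1 - 1) // 2
--     for i, (k1, v1) in enumerate(items):
--         for (k2, v2) in items[i + 1:]:
--             (f, g) = (k1, k2)
--             while f > 0:
--                 (g, f) = (f, g % f)
--             if g == 1:
--                 awk = (awk + v1 * v2) % mdl
--     return awk
-- ===== Notes on version B (the rewrite author's own statement) =====
-- stated objective: alternative
-- what changed: The recursive digit-decade decomposition rangetodsum is replaced by an iterative two-phase version (an explicit loop collects the nested (lo,hi) levels, then a reversed loop combines them back-to-front with unconditional d.get(k,0)+c updates), and the pair phase iterates enumerate(items) with a slice items[i+1:] instead of nested index ranges, seeding the count with dsum.get(1,0) instead of a membership test.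
import Mathlib
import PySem

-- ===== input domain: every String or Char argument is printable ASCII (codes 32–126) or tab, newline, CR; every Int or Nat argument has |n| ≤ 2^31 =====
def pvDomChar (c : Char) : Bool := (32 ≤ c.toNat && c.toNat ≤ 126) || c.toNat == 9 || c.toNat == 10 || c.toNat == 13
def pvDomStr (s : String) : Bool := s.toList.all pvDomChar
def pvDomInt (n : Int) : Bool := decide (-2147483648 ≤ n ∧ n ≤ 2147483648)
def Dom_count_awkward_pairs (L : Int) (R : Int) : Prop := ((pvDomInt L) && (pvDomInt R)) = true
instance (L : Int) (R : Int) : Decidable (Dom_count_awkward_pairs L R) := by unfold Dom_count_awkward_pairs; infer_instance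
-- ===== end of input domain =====

-- B replaces A's recursive decade decomposition by an iterative two-phase version (collect the
-- nested levels, then combine them back-to-front) and counts pairs by enumerate + slicing instead
-- of index ranges; same return value on every input (objective: alternative, not faster).

-- ===== PORT A =====
-- the digit-sum while-loop (onedsum in A, _digsum in B; identical code)
def pyDigitSumGo (ds a : Int) : Int :=
  if 9 < a then pyDigitSumGo (ds + PySem.Int.mod a 10) (PySem.Int.floordiv a 10)
  else ds + a
termination_by a.toNat
decreasing_by
  have h1 : PySem.Int.floordiv a 10 * 10 + PySem.Int.mod a 10 = a := PySem.Int.floordiv_mul_add_mod a 10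
  have h2 : 0 ≤ PySem.Int.mod a 10 := PySem.Int.mod_nonneg a (by norm_num)
  have h3 : PySem.Int.mod a 10 < 10 := PySem.Int.mod_lt a (by norm_num)
  omega

def pyDigitSum (a : Int) : Int := pyDigitSumGo 0 a

-- the inline Euclid while-loop of both mains: while f > 0: (g, f) = (f, g % f); returns g
def pyGcdLoop (f g : Int) : Int :=
  if 0 < f then pyGcdLoop (PySem.Int.mod g f) f else g
termination_by f.toNat
decreasing_by
  have h3 : PySem.Int.mod g f < f := PySem.Int.mod_lt g (by omega)
  omega

def rangetodsum (lo hi : Int) : PySem.Dict Int Int :=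
  let lod := PySem.Int.floordiv lo 10
  let lom := PySem.Int.mod lo 10
  let hid := PySem.Int.floordiv hi 10
  let him := PySem.Int.mod hi 10
  if lod = hid then
    let dlo := pyDigitSum lod
    (PySem.List.pyRange lom (him + 1) 1).foldl (fun d i => d.insert (dlo + i) 1) PySem.Dict.empty
  else
    let dlo := pyDigitSum lod
    let d1 := (PySem.List.pyRange lom 10 1).foldl (fun d i => d.insert (dlo + i) 1) PySem.Dict.empty
    let dhi := pyDigitSum hid
    let d2 := (PySem.List.pyRange dhi (dhi + him + 1) 1).foldl
      (fun d h => if d.contains h then d.insert h (d.getD h 0 + 1) else d.insert h 1) d1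
    if lod + 1 ≤ hid - 1 then
      let rsum := rangetodsum (lod + 1) (hid - 1)
      rsum.items.foldl (fun d p =>
        (PySem.List.pyRange 0 10 1).foldl (fun d u =>
          let k := p.1 + u
          if d.contains k then d.insert k (d.getD k 0 + p.2) else d.insert k p.2) d) d2
    else d2
termination_by (hi - lo).toNat
decreasing_by
  have e1 : PySem.Int.floordiv lo 10 * 10 + PySem.Int.mod lo 10 = lo := PySem.Int.floordiv_mul_add_mod lo 10
  have e2 : PySem.Int.floordiv hi 10 * 10 + PySem.Int.mod hi 10 = hi := PySem.Int.floordiv_mul_add_mod hi 10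
  have m1 : 0 ≤ PySem.Int.mod lo 10 := PySem.Int.mod_nonneg lo (by norm_num)
  have m2 : PySem.Int.mod lo 10 < 10 := PySem.Int.mod_lt lo (by norm_num)
  have m3 : 0 ≤ PySem.Int.mod hi 10 := PySem.Int.mod_nonneg hi (by norm_num)
  have m4 : PySem.Int.mod hi 10 < 10 := PySem.Int.mod_lt hi (by norm_num)
  omega

def count_awkward_pairs (L : Int) (R : Int) : Int :=
  let mdl : Int := 1000000007
  let dsum := rangetodsum L R
  let dlst := dsum.items
  let awk0 : Int :=
    if dsum.contains 1 then PySem.Int.floordiv (dsum.getD 1 0 * (dsum.getD 1 0 - 1)) 2 else 0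
  (PySem.List.pyRange 0 ((dlst.length : Int) - 1) 1).foldl (fun awk ix1 =>
    let a := PySem.List.pyGetD dlst ix1 (0, 0)
    (PySem.List.pyRange (ix1 + 1) (dlst.length : Int) 1).foldl (fun awk ix2 =>
      let b := PySem.List.pyGetD dlst ix2 (0, 0)
      let g := pyGcdLoop a.1 b.1
      if g = 1 then PySem.Int.mod (awk + a.2 * b.2) mdl else awk) awk) awk0

-- ===== PORT B =====
def pyRows (lo hi : Int) : PySem.Dict Int Int :=
  let lod := PySem.Int.floordiv lo 10
  let lom := PySem.Int.mod lo 10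
  let hid := PySem.Int.floordiv hi 10
  let him := PySem.Int.mod hi 10
  let dlo := pyDigitSum lod
  let d1 := (PySem.List.pyRange lom 10 1).foldl (fun d i => d.insert (dlo + i) 1) PySem.Dict.empty
  let dhi := pyDigitSum hid
  (PySem.List.pyRange dhi (dhi + him + 1) 1).foldl
    (fun d h => d.insert h (d.getD h 0 + 1)) d1

def pyBase (lo hi : Int) : PySem.Dict Int Int :=
  let lod := PySem.Int.floordiv lo 10
  let lom := PySem.Int.mod lo 10
  let hid := PySem.Int.floordiv hi 10
  let him := PySem.Int.mod hi 10
  if lod = hid then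
    let dlo := pyDigitSum lod
    (PySem.List.pyRange lom (him + 1) 1).foldl (fun d i => d.insert (dlo + i) 1) PySem.Dict.empty
  else pyRows lo hi

def pyCombine (lo hi : Int) (rsum : PySem.Dict Int Int) : PySem.Dict Int Int :=
  rsum.items.foldl (fun d p =>
    (PySem.List.pyRange 0 10 1).foldl (fun d u =>
      d.insert (p.1 + u) (d.getD (p.1 + u) 0 + p.2)) d) (pyRows lo hi)

def pyDescend (lo hi : Int) (acc : List (Int × Int)) : List (Int × Int) × Int × Int :=
  let lod := PySem.Int.floordiv lo 10
  let hid := PySem.Int.floordiv hi 10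
  if lod = hid ∨ hid - 1 < lod + 1 then (acc, lo, hi)
  else pyDescend (lod + 1) (hid - 1) (acc ++ [(lo, hi)])
termination_by (hi - lo).toNat
decreasing_by
  have e1 : PySem.Int.floordiv lo 10 * 10 + PySem.Int.mod lo 10 = lo := PySem.Int.floordiv_mul_add_mod lo 10
  have e2 : PySem.Int.floordiv hi 10 * 10 + PySem.Int.mod hi 10 = hi := PySem.Int.floordiv_mul_add_mod hi 10
  have m1 : 0 ≤ PySem.Int.mod lo 10 := PySem.Int.mod_nonneg lo (by norm_num)
  have m2 : PySem.Int.mod lo 10 < 10 := PySem.Int.mod_lt lo (by norm_num)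
  have m3 : 0 ≤ PySem.Int.mod hi 10 := PySem.Int.mod_nonneg hi (by norm_num)
  have m4 : PySem.Int.mod hi 10 < 10 := PySem.Int.mod_lt hi (by norm_num)
  omega

def pyRangeDsum (lo hi : Int) : PySem.Dict Int Int :=
  let t := pyDescend lo hi []
  t.1.reverse.foldl (fun d p => pyCombine p.1 p.2 d) (pyBase t.2.1 t.2.2)

def count_awkward_pairs_alt (L : Int) (R : Int) : Int :=
  let mdl : Int := 1000000007
  let dsum := pyRangeDsum L R
  let items := dsum.items
  let c1 := dsum.getD 1 0
  let awk0 := PySem.Int.floordiv (c1 * (c1 - 1)) 2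
  (PySem.List.enumerate items 0).foldl (fun awk p =>
    (PySem.List.slice items (some (p.1 + 1)) none).foldl (fun awk q =>
      let g := pyGcdLoop p.2.1 q.1
      if g = 1 then PySem.Int.mod (awk + p.2.2 * q.2) mdl else awk) awk) awk0

-- ===== PRECONDITION & SPEC =====
def Spec_count_awkward_pairs (L : Int) (R : Int) (out : Int) : Prop := out = count_awkward_pairs_alt L R
instance (L : Int) (R : Int) (out : Int) : Decidable (Spec_count_awkward_pairs L R out) := by unfold Spec_count_awkward_pairs; infer_instance

-- ===== CLAIM (what is proved, stated in full; the proofs are below) =====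
def Claim_equal_count_awkward_pairs : Prop := ∀ (L : Int) (R : Int), Dom_count_awkward_pairs L R → Spec_count_awkward_pairs L R (count_awkward_pairs L R)

-- ===== LEMMAS AND PROOFS =====

lemma pyDec (lo hi : Int)
    (h2 : PySem.Int.floordiv lo 10 + 1 ≤ PySem.Int.floordiv hi 10 - 1) :
    (PySem.Int.floordiv hi 10 - 1 - (PySem.Int.floordiv lo 10 + 1)).toNat < (hi - lo).toNat := by
  have e1 : PySem.Int.floordiv lo 10 * 10 + PySem.Int.mod lo 10 = lo := PySem.Int.floordiv_mul_add_mod lo 10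
  have e2 : PySem.Int.floordiv hi 10 * 10 + PySem.Int.mod hi 10 = hi := PySem.Int.floordiv_mul_add_mod hi 10
  have m1 : 0 ≤ PySem.Int.mod lo 10 := PySem.Int.mod_nonneg lo (by norm_num)
  have m2 : PySem.Int.mod lo 10 < 10 := PySem.Int.mod_lt lo (by norm_num)
  have m3 : 0 ≤ PySem.Int.mod hi 10 := PySem.Int.mod_nonneg hi (by norm_num)
  have m4 : PySem.Int.mod hi 10 < 10 := PySem.Int.mod_lt hi (by norm_num)
  omega

-- d[h] = d.get(h, 0) + 1 (B) coincides with A's contains-branching update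
lemma insert_getD_eq (d : PySem.Dict Int Int) (k v : Int) :
    d.insert k (d.getD k 0 + v) = if d.contains k then d.insert k (d.getD k 0 + v) else d.insert k v := by
  by_cases h : d.contains k = true
  · rw [if_pos h]
  · rw [if_neg h]
    have h' : d.contains k = false := by simp only [Bool.not_eq_true] at h; exact h
    rw [PySem.Dict.getD_of_not_contains d 0 h', zero_add]

lemma pyRows_eq (lo hi : Int) :
    pyRows lo hi
      = (PySem.List.pyRange (pyDigitSum (PySem.Int.floordiv hi 10))
          (pyDigitSum (PySem.Int.floordiv hi 10) + PySem.Int.mod hi 10 + 1) 1).foldl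
          (fun d h => if d.contains h then d.insert h (d.getD h 0 + 1) else d.insert h 1)
          ((PySem.List.pyRange (PySem.Int.mod lo 10) 10 1).foldl
            (fun d i => d.insert (pyDigitSum (PySem.Int.floordiv lo 10) + i) 1) PySem.Dict.empty) := by
  rw [pyRows]
  exact PySem.List.foldl_congr_mem _ _ _ _ (fun d h _ => insert_getD_eq d h 1)

lemma pyCombine_eq (lo hi : Int) (rsum : PySem.Dict Int Int) :
    pyCombine lo hi rsum
      = rsum.items.foldl (fun d p =>
          (PySem.List.pyRange 0 10 1).foldl (fun d u =>
            let k := p.1 + u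
            if d.contains k then d.insert k (d.getD k 0 + p.2) else d.insert k p.2) d)
          (pyRows lo hi) := by
  rw [pyCombine]
  refine PySem.List.foldl_congr_mem _ _ _ _ (fun d p _ => ?_)
  exact PySem.List.foldl_congr_mem _ _ _ _ (fun d u _ => insert_getD_eq d (p.1 + u) p.2)

lemma rangetodsum_base (lo hi : Int)
    (h : PySem.Int.floordiv lo 10 = PySem.Int.floordiv hi 10 ∨
         PySem.Int.floordiv hi 10 - 1 < PySem.Int.floordiv lo 10 + 1) :
    rangetodsum lo hi = pyBase lo hi := by
  rcases h with h | h
  · rw [rangetodsum, pyBase]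
    simp only [if_pos h]
  · by_cases h1 : PySem.Int.floordiv lo 10 = PySem.Int.floordiv hi 10
    · rw [rangetodsum, pyBase]; simp only [if_pos h1]
    · rw [rangetodsum, pyBase, pyRows_eq]
      simp only [if_neg h1, if_neg (by omega : ¬(PySem.Int.floordiv lo 10 + 1 ≤ PySem.Int.floordiv hi 10 - 1))]

lemma rangetodsum_step (lo hi : Int)
    (h1 : PySem.Int.floordiv lo 10 ≠ PySem.Int.floordiv hi 10)
    (h2 : PySem.Int.floordiv lo 10 + 1 ≤ PySem.Int.floordiv hi 10 - 1) :
    rangetodsum lo hi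
      = pyCombine lo hi (rangetodsum (PySem.Int.floordiv lo 10 + 1) (PySem.Int.floordiv hi 10 - 1)) := by
  rw [rangetodsum, pyCombine_eq, pyRows_eq]
  simp only [if_neg h1, if_pos h2]

lemma pyDescend_acc (lo hi : Int) (acc : List (Int × Int)) :
    pyDescend lo hi acc = (acc ++ (pyDescend lo hi []).1, (pyDescend lo hi []).2) := by
  generalize hn : (hi - lo).toNat = n
  induction n using Nat.strong_induction_on generalizing lo hi acc with
  | _ n ih =>
    conv_lhs => rw [pyDescend]
    conv_rhs => rw [pyDescend]
    by_cases hc : PySem.Int.floordiv lo 10 = PySem.Int.floordiv hi 10 ∨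
        PySem.Int.floordiv hi 10 - 1 < PySem.Int.floordiv lo 10 + 1
    · simp only [if_pos hc, List.append_nil]
    · simp only [if_neg hc]
      simp only [not_or, not_lt] at hc
      have hd := pyDec lo hi (by omega)
      simp only [List.nil_append]
      rw [ih _ (hn ▸ hd) _ _ (acc ++ [(lo, hi)]) rfl,
          ih _ (hn ▸ hd) _ _ ([(lo, hi)]) rfl]
      simp [List.append_assoc]

lemma rangeDsum_eq (lo hi : Int) : pyRangeDsum lo hi = rangetodsum lo hi := by
  generalize hn : (hi - lo).toNat = n
  induction n using Nat.strong_induction_on generalizing lo hi with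
  | _ n ih =>
    rw [pyRangeDsum, pyDescend]
    by_cases hc : PySem.Int.floordiv lo 10 = PySem.Int.floordiv hi 10 ∨
        PySem.Int.floordiv hi 10 - 1 < PySem.Int.floordiv lo 10 + 1
    · simp only [if_pos hc, List.reverse_nil, List.foldl_nil]
      exact (rangetodsum_base lo hi hc).symm
    · simp only [if_neg hc]
      simp only [not_or, not_lt] at hc
      obtain ⟨h1, h2⟩ : PySem.Int.floordiv lo 10 ≠ PySem.Int.floordiv hi 10 ∧
          PySem.Int.floordiv lo 10 + 1 ≤ PySem.Int.floordiv hi 10 - 1 := ⟨hc.1, by omega⟩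
      have hd := pyDec lo hi h2
      rw [pyDescend_acc _ _ ([] ++ [(lo, hi)])]
      have hrec : pyRangeDsum (PySem.Int.floordiv lo 10 + 1) (PySem.Int.floordiv hi 10 - 1)
          = rangetodsum (PySem.Int.floordiv lo 10 + 1) (PySem.Int.floordiv hi 10 - 1) :=
        ih _ (hn ▸ hd) _ _ rfl
      rw [pyRangeDsum] at hrec
      simp only [List.nil_append, List.reverse_append, List.reverse_cons, List.reverse_nil,
        List.nil_append, List.foldl_append, List.foldl_cons, List.foldl_nil]
      rw [hrec]
      exact (rangetodsum_step lo hi h1 h2).symm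

lemma awk0_eq (d : PySem.Dict Int Int) :
    (if d.contains 1 = true then PySem.Int.floordiv (d.getD 1 0 * (d.getD 1 0 - 1)) 2 else 0)
    = PySem.Int.floordiv (d.getD 1 0 * (d.getD 1 0 - 1)) 2 := by
  by_cases h : d.contains 1 = true
  · rw [if_pos h]
  · rw [if_neg h]
    have h' : d.contains 1 = false := by simp only [Bool.not_eq_true] at h; exact h
    have h0 : d.getD 1 0 = 0 := by
      simp [PySem.Dict.getD_of_not_contains, h']
    rw [h0]
    decide

-- B's inner loop over items[j+1:] equals A's inner index loop, for 0 ≤ j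
lemma inner_eq (items : List (Int × Int)) (j : Int) (hj : 0 ≤ j) (a : Int × Int) (awk : Int) :
    (PySem.List.pyRange (j + 1) ((items.length : Int)) 1).foldl (fun awk ix2 =>
        let b := PySem.List.pyGetD items ix2 ((0 : Int), (0 : Int))
        let g := pyGcdLoop a.1 b.1
        if g = 1 then PySem.Int.mod (awk + a.2 * b.2) 1000000007 else awk) awk
    = (PySem.List.slice items (some (j + 1)) none).foldl (fun awk q =>
        let g := pyGcdLoop a.1 q.1
        if g = 1 then PySem.Int.mod (awk + a.2 * q.2) 1000000007 else awk) awk := by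
  rw [PySem.List.slice_from items (by omega : (0:Int) ≤ j + 1)]
  exact PySem.List.foldl_pyRange_pyGetD' items ((0 : Int), (0 : Int))
    (fun awk b => if pyGcdLoop a.1 b.1 = 1 then PySem.Int.mod (awk + a.2 * b.2) 1000000007 else awk)
    awk (by omega : (0:Int) ≤ j + 1)

lemma pair_fold_eq (items : List (Int × Int)) (awk0 : Int) :
    (PySem.List.pyRange 0 ((items.length : Int) - 1) 1).foldl (fun awk ix1 =>
      let a := PySem.List.pyGetD items ix1 ((0 : Int), (0 : Int))
      (PySem.List.pyRange (ix1 + 1) ((items.length : Int)) 1).foldl (fun awk ix2 =>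
        let b := PySem.List.pyGetD items ix2 ((0 : Int), (0 : Int))
        let g := pyGcdLoop a.1 b.1
        if g = 1 then PySem.Int.mod (awk + a.2 * b.2) 1000000007 else awk) awk) awk0
    = (PySem.List.enumerate items 0).foldl (fun awk p =>
        (PySem.List.slice items (some (p.1 + 1)) none).foldl (fun awk q =>
          let g := pyGcdLoop p.2.1 q.1
          if g = 1 then PySem.Int.mod (awk + p.2.2 * q.2) 1000000007 else awk) awk) awk0 := by
  rw [PySem.List.enumerate_eq_map_pyRange items ((0 : Int), (0 : Int)), List.foldl_map]
  simp only [PySem.List.len_eq]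
  -- B's fold now runs over pyRange 0 (length); split off the final, no-op index
  cases items with
  | nil => simp [PySem.List.pyRange_one_eq_nil]
  | cons x xs =>
    have hlen : ((((x :: xs).length : Int)) - 1) ≤ ((x :: xs).length : Int) := by omega
    have h0 : (0 : Int) ≤ (((x :: xs).length : Int)) - 1 := by
      simp only [List.length_cons]; push_cast; omega
    rw [show PySem.List.pyRange 0 (((x :: xs).length : Int)) 1
        = PySem.List.pyRange 0 ((((x :: xs).length : Int)) - 1) 1 ++ [(((x :: xs).length : Int)) - 1] by
      rw [← PySem.List.pyRange_one_succ_right h0]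
      norm_num]
    rw [List.foldl_append]
    have hlast : PySem.List.slice (x :: xs) (some ((((x :: xs).length : Int)) - 1 + 1)) none = [] := by
      rw [PySem.List.slice_from _ (by omega : (0:Int) ≤ (((x :: xs).length : Int)) - 1 + 1)]
      simp
    simp only [List.foldl_cons, List.foldl_nil, hlast]
    refine PySem.List.foldl_congr_mem _ _ _ _ (fun awk j hj => ?_)
    have hj0 : 0 ≤ j := (PySem.List.mem_pyRange_one.mp hj).1
    exact inner_eq (x :: xs) j hj0 _ awk

lemma mains_eq (L R : Int) : count_awkward_pairs L R = count_awkward_pairs_alt L R := by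
  simp only [count_awkward_pairs, count_awkward_pairs_alt, rangeDsum_eq]
  rw [awk0_eq]
  exact pair_fold_eq (rangetodsum L R).items _

-- ===== VERDICT (by name: the statement is the Claim_ definition above) =====
theorem count_awkward_pairs_spec : Claim_equal_count_awkward_pairs := by
  intro L R _
  exact mains_eq L R
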